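-- pv_equiv track=rewrite | github.com/Pardus-LiderAhenk/lider-ahenk-installer | src/api/ldap/openldap.py | base_dn_parse
-- ===== SOURCE A (Python) =====
-- def base_dn_parse(data):
--     ### split for get data['base_dn']: liderahenk.org #BASECN and #BASEDN
--     parse_dn = data["l_base_dn"].split('.')
--     base_cn = parse_dn[0]
--     dn_list = []
--     for dn in parse_dn:
--         message = 'dc=' + str(dn) + ','
--         dn_list.append(message)
--     base_dn = ''.join(str(x) for x in dn_list)
--     base_dn = base_dn.strip(',')
--     return base_dn, base_cn
-- ===== SOURCE B (Python) =====
-- def base_dn_parse(data):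
--     # Build the whole DN by one substitution over the raw string instead of
--     # split -> per-element list build -> join -> strip; keep the strip(',')
--     # cleanup A applies to the assembled string.
--     domain = data["l_base_dn"]
--     base_dn = ('dc=' + domain.replace('.', ',dc=')).strip(',')
--     base_cn = domain.partition('.')[0]
--     return base_dn, base_cn
-- ===== Notes on version B (the rewrite author's own statement) =====
-- stated objective: idiomatic
-- what changed: Replaces the split/loop/list/join pipeline with a single string substitution ('dc=' + domain.replace('.', ',dc=')) and computes base_cn via partition instead of indexing a full split.
import Mathlib
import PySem

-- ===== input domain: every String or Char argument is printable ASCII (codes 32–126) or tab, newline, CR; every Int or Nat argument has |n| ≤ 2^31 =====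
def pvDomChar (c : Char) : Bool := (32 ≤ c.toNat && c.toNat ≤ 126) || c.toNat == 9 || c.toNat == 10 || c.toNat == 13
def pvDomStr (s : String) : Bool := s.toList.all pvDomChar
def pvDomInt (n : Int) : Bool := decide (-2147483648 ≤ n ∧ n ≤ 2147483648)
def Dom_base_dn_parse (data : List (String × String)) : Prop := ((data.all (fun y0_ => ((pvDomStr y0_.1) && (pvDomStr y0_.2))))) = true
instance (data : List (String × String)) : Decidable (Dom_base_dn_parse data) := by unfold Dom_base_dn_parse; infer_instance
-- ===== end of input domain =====

-- B replaces A's split→loop→join→strip pipeline by one string substitution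
-- ('dc=' + domain.replace('.', ',dc=')).strip(',') and partition for base_cn (idiomatic, same cost).

-- ===== PORT A =====
def base_dn_parse (data : List (String × String)) : String × String :=
  -- data["l_base_dn"] raises KeyError when the key is absent; Pre_ excludes that, default never used
  let s := ((PySem.Dict.mk data).get? "l_base_dn").getD ""
  let parse_dn := (PySem.Str.split? s ".").getD []      -- sep "." ≠ "", so split? is always some
  let base_cn := (PySem.List.pyGet? parse_dn (0 : Int)).getD ""  -- split never returns [], so always some
  let dn_list := parse_dn.foldl (fun dn_list dn => dn_list ++ ["dc=" ++ dn ++ ","]) ([] : List String)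
  let base_dn := PySem.Str.join "" dn_list
  let base_dn := PySem.Str.stripChars base_dn ","
  (base_dn, base_cn)

-- ===== PORT B =====
def base_dn_parse_alt (data : List (String × String)) : String × String :=
  let domain := ((PySem.Dict.mk data).get? "l_base_dn").getD ""
  let base_dn := PySem.Str.stripChars ("dc=" ++ PySem.Str.replace domain "." ",dc=") ","
  -- domain.partition('.')[0] = the characters before the first '.' (hand port, exact)
  let base_cn := String.ofList (domain.toList.takeWhile (fun c => c != '.'))
  (base_dn, base_cn)

-- ===== PRECONDITION & SPEC =====
-- Pre_: the dict must contain key "l_base_dn" (otherwise Python A raises KeyError).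
def Pre_base_dn_parse (data : List (String × String)) : Prop :=
  ((PySem.Dict.mk data).get? "l_base_dn").isSome = true
instance (data : List (String × String)) : Decidable (Pre_base_dn_parse data) := by unfold Pre_base_dn_parse; infer_instance
def pvWitness_base_dn_parse : (List (String × String)) := [("l_base_dn", "liderahenk.org")]

def Spec_base_dn_parse (data : List (String × String)) (out : String × String) : Prop := out = base_dn_parse_alt data
instance (data : List (String × String)) (out : String × String) : Decidable (Spec_base_dn_parse data out) := by unfold Spec_base_dn_parse; infer_instance

-- ===== CLAIM (what is proved, stated in full; the proofs are below) =====
def Claim_equal_base_dn_parse : Prop := ∀ (data : List (String × String)), Dom_base_dn_parse data → Pre_base_dn_parse data → Spec_base_dn_parse data (base_dn_parse data)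

-- ===== LEMMAS AND PROOFS =====

-- reference split on '.' (structural recursion); glue prepends onto the head piece
def pvGlue (x : List Char) : List (List Char) → List (List Char)
  | [] => [x]
  | y :: ys => (x ++ y) :: ys

def pvConsHead (c : Char) : List (List Char) → List (List Char)
  | [] => [[c]]
  | y :: ys => (c :: y) :: ys

def pvSplit : List Char → List (List Char)
  | [] => [[]]
  | c :: t => if c = '.' then [] :: pvSplit t else pvConsHead c (pvSplit t)

-- reference replace of '.' by ",dc="
def pvRep : List Char → List Char
  | [] => []
  | c :: t => if c = '.' then [',', 'd', 'c', '='] ++ pvRep t else c :: pvRep t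

theorem pvSplit_ne_nil (l : List Char) : pvSplit l ≠ [] := by
  cases l with
  | nil => simp [pvSplit]
  | cons c t =>
    simp only [pvSplit]
    split
    · simp
    · cases h : pvSplit t <;> simp [pvConsHead]

theorem pvGlue_nil {xs : List (List Char)} (h : xs ≠ []) : pvGlue [] xs = xs := by
  cases xs with
  | nil => exact absurd rfl h
  | cons y ys => simp [pvGlue]

theorem splitOn_go_eq (fuel : Nat) (l cur : List Char) (acc : List (List Char))
    (h : l.length < fuel) :
    PySem.Chars.splitOn.go ['.'] fuel l cur acc = acc.reverse ++ pvGlue cur.reverse (pvSplit l) := by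
  induction fuel generalizing l cur acc with
  | zero => omega
  | succ fuel ih =>
    cases l with
    | nil => simp [PySem.Chars.splitOn.go, pvSplit, pvGlue]
    | cons c t =>
      by_cases hc : c = '.'
      · subst hc
        have h1 : List.isPrefixOf ['.'] ('.' :: t) = true := by
          simp [List.isPrefixOf]
        simp only [PySem.Chars.splitOn.go, h1, if_true, List.length_cons, List.length_nil,
          List.drop_succ_cons, List.drop_zero]
        rw [ih t [] (cur.reverse :: acc) (by simpa using Nat.lt_of_succ_lt_succ h)]
        rw [List.reverse_nil, pvGlue_nil (pvSplit_ne_nil t)]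
        simp [pvSplit, pvGlue]
      · have h1 : List.isPrefixOf ['.'] (c :: t) = false := by
          simp [List.isPrefixOf]
          exact fun hh => hc hh.symm
        simp only [PySem.Chars.splitOn.go, h1]
        rw [if_neg (by decide)]
        rw [ih t (c :: cur) acc (by simpa using Nat.lt_of_succ_lt_succ h)]
        cases hp : pvSplit t with
        | nil => exact absurd hp (pvSplit_ne_nil t)
        | cons y ys => simp [pvSplit, if_neg hc, hp, pvGlue, pvConsHead]

theorem splitOn_eq (cs : List Char) : PySem.Chars.splitOn cs ['.'] = pvSplit cs := by
  unfold PySem.Chars.splitOn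
  rw [splitOn_go_eq (cs.length + 1) cs [] [] (by omega)]
  simp [pvGlue_nil (pvSplit_ne_nil cs)]

theorem replace_go_eq (fuel : Nat) (l acc : List Char) (h : l.length ≤ fuel) :
    PySem.Chars.replace.go ['.'] [',', 'd', 'c', '='] fuel l acc = acc.reverse ++ pvRep l := by
  induction fuel generalizing l acc with
  | zero =>
    cases l with
    | nil => simp [PySem.Chars.replace.go, pvRep]
    | cons c t => simp at h
  | succ fuel ih =>
    cases l with
    | nil => simp [PySem.Chars.replace.go, pvRep]
    | cons c t =>
      by_cases hc : c = '.'
      · subst hc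
        have h1 : List.isPrefixOf ['.'] ('.' :: t) = true := by
          simp [List.isPrefixOf]
        simp only [PySem.Chars.replace.go, h1, if_true, List.length_cons, List.length_nil,
          List.drop_succ_cons, List.drop_zero]
        rw [ih t _ (by simpa using Nat.le_of_succ_le_succ h)]
        simp [pvRep]
      · have h1 : List.isPrefixOf ['.'] (c :: t) = false := by
          simp [List.isPrefixOf]
          exact fun hh => hc hh.symm
        simp only [PySem.Chars.replace.go, h1]
        rw [if_neg (by decide)]
        rw [ih t (c :: acc) (by simpa using Nat.le_of_succ_le_succ h)]
        simp [pvRep, if_neg hc]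

theorem replace_eq (cs : List Char) :
    PySem.Chars.replace cs ['.'] [',', 'd', 'c', '='] = pvRep cs := by
  unfold PySem.Chars.replace
  rw [if_neg (by simp), replace_go_eq (cs.length) cs [] (by omega)]
  simp

theorem pvRep_eq_join (cs : List Char) :
    pvRep cs = PySem.Chars.join [',', 'd', 'c', '='] (pvSplit cs) := by
  induction cs with
  | nil => simp [pvRep, pvSplit, PySem.Chars.join_singleton]
  | cons c t ih =>
    by_cases hc : c = '.'
    · subst hc
      cases hp : pvSplit t with
      | nil => exact absurd hp (pvSplit_ne_nil t)
      | cons y ys =>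
        rw [show pvSplit ('.' :: t) = [] :: y :: ys by simp [pvSplit, hp],
            show pvRep ('.' :: t) = [',', 'd', 'c', '='] ++ pvRep t by simp [pvRep],
            PySem.Chars.join_cons_cons, ← hp, ← ih]
        simp
    · cases hp : pvSplit t with
      | nil => exact absurd hp (pvSplit_ne_nil t)
      | cons y ys =>
        rw [show pvSplit (c :: t) = (c :: y) :: ys by simp [pvSplit, if_neg hc, hp, pvConsHead],
            show pvRep (c :: t) = c :: pvRep t by simp [pvRep, if_neg hc],
            ih, hp]
        cases ys with
        | nil => rw [PySem.Chars.join_singleton, PySem.Chars.join_singleton]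
        | cons z zs =>
          rw [PySem.Chars.join_cons_cons, PySem.Chars.join_cons_cons]
          simp

theorem joinF (p : List Char) (ps : List (List Char)) :
    PySem.Chars.join [] (List.map (fun q => ['d', 'c', '='] ++ q ++ [',']) (p :: ps))
      = ['d', 'c', '='] ++ PySem.Chars.join [',', 'd', 'c', '='] (p :: ps) ++ [','] := by
  induction ps generalizing p with
  | nil => simp [PySem.Chars.join_singleton]
  | cons q qs ih =>
    simp only [List.map_cons] at *
    rw [PySem.Chars.join_cons_cons, PySem.Chars.join_cons_cons, ih]
    simp

theorem strip_comma_append (Y : List Char) :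
    PySem.Chars.stripChars (['d', 'c', '='] ++ Y ++ [',']) [',']
      = PySem.Chars.stripChars (['d', 'c', '='] ++ Y) [','] := by
  simp [PySem.Chars.stripChars, List.reverse_append]

theorem foldl_append_map (g : String → String) (xs : List String) (init : List String) :
    xs.foldl (fun l x => l ++ [g x]) init = init ++ xs.map g := by
  induction xs generalizing init with
  | nil => simp
  | cons x t ih => simp [List.foldl_cons, ih]

theorem pvSplit_head (cs : List Char) :
    ∃ ys, pvSplit cs = (cs.takeWhile (fun c => c != '.')) :: ys := by
  induction cs with
  | nil => exact ⟨[], rfl⟩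
  | cons c t ih =>
    obtain ⟨ys, hy⟩ := ih
    by_cases hc : c = '.'
    · subst hc
      exact ⟨pvSplit t, by simp [pvSplit, List.takeWhile]⟩
    · refine ⟨ys, ?_⟩
      simp only [pvSplit, if_neg hc, hy, pvConsHead, List.takeWhile]
      rw [show (c != '.') = true by simp [hc]]

theorem str_eq_of_toList {a b : String} (h : a.toList = b.toList) : a = b := by
  have := congrArg String.ofList h
  simpa using this

-- ===== VERDICT (by name: the statement is the Claim_ definition above) =====
theorem base_dn_parse_spec : Claim_equal_base_dn_parse := by
  intro data _ _
  unfold Spec_base_dn_parse base_dn_parse base_dn_parse_alt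
  set s : String := ((PySem.Dict.mk data).get? "l_base_dn").getD "" with hs
  have hdot : ("." : String).toList = ['.'] := rfl
  have hsplit : (PySem.Str.split? s ".").getD [] = (pvSplit s.toList).map String.ofList := by
    simp [PySem.Str.split?, PySem.Chars.split?, hdot, splitOn_eq]
  obtain ⟨p, ps, hpp⟩ : ∃ p ps, pvSplit s.toList = p :: ps := by
    cases h' : pvSplit s.toList with
    | nil => exact absurd h' (pvSplit_ne_nil _)
    | cons a b => exact ⟨a, b, rfl⟩
  simp only [hsplit, Prod.mk.injEq]
  constructor
  · -- base_dn component
    apply str_eq_of_toList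
    rw [foldl_append_map (fun dn => "dc=" ++ dn ++ ",") _ []]
    rw [PySem.Str.toList_stripChars, PySem.Str.toList_stripChars, PySem.Str.toList_join]
    have hmap : List.map String.toList
        (List.map (fun dn => "dc=" ++ dn ++ ",") ((pvSplit s.toList).map String.ofList))
        = List.map (fun q => ['d', 'c', '='] ++ q ++ [',']) (pvSplit s.toList) := by
      simp [List.map_map, Function.comp]
    rw [List.nil_append, hmap, hpp,
      show ("" : String).toList = ([] : List Char) from rfl,
      show ("," : String).toList = [','] from rfl,
      joinF, ← hpp, ← pvRep_eq_join, strip_comma_append]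
    have hrepl : ("dc=" ++ PySem.Str.replace s "." ",dc=").toList
        = ['d', 'c', '='] ++ pvRep s.toList := by
      simp [PySem.Str.toList_replace, hdot, show (",dc=" : String).toList = [',', 'd', 'c', '='] from rfl,
        replace_eq, show ("dc=" : String).toList = ['d', 'c', '='] from rfl]
    rw [hrepl]
  · -- base_cn component
    obtain ⟨ys, hy⟩ := pvSplit_head s.toList
    rw [hy]
    simp [PySem.List.pyGet?, PySem.List.pyIdx?]
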